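/- GENERATED by mk_final_copies.py from the proof of the farm's unit `float32_unpack` (farm:float32_unpack.1: Proof.lean) as the
   re-elaboration sweep compiled it — do not edit. -/
import Vorbis.Spec.Units.float32_unpack

open X86 X86.User Asan Vorbis

set_option maxRecDepth 4000
set_option maxHeartbeats 4000000

/-- `float32_unpack(edi = x)` satisfies its contract. `sub rsp, 8`, integer operations on the bits of `x`, a branch on the sign
bit (`js`, 0x10b99a: the negative arm at 0x10b9c3 reads the 16-byte sign mask at 0x120000 for `xorpd` and jumps back), both arms
meet at 0x10b9a7 and call `ldexp` at 0x10b9b5 (an ordinary `ShadowPre` callee, any `n`); after the return (the cut point,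
0x10b9ba): `cvtsd2ss ; add rsp, 8 ; ret`. No check site; the floats are opaque. The walker walks the two arms separately, so
every goal comes twice (positive arm first). -/
theorem Vorbis.Spec.Worked.float32_unpack_ok : Vorbis.Spec.float32_unpack.Statement := by
  intro Lay hLay μ hμ u₀ hcode hld others frames u ret he hpre
  v_entry he
  have hld' := hld others frames
  have hsh : ShadowPre others frames u := hpre
  -- 0x10b980 … 0x10b9b5 (stb_vorbis_fixed.c:1085-1091): from the entry to the call of `ldexp`, on both arms of the `js`
  u_walk hcode [hμ.vendor] span [Vorbis.L.textLo, Vorbis.L.textHi] side (v_side)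
  -- DF and the MXCSR masks at the callee's entry (one per arm)
  case call_inv => v_inv
  case call_inv => v_inv
  -- the precondition of `ldexp`: its shadow clause, 16 bytes below our entry rsp (one per arm)
  case pre_10b9b5 =>
    show ShadowPre others frames s_10b9b5
    refine hsh.callee ?_ ?_ ?_ ?_
    · v_untouched
    · rw [w_rsp]
      u_omega
    · rw [w_rsp]
      u_omega
    · rw [w_rsp]
      u_omega
  case pre_10b9b5 =>
    show ShadowPre others frames s_10b9b5
    refine hsh.callee ?_ ?_ ?_ ?_
    · v_untouched
    · rw [w_rsp]
      u_omega
    · rw [w_rsp]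
      u_omega
    · rw [w_rsp]
      u_omega
  -- 0x10b9ba (the cut point after the call, stb_vorbis_fixed.c:1091-1092): `cvtsd2ss ; add rsp, 8 ; ret`, once per arm
  · v_after_call w_rsp_10b9b5 w_mem_10b9b5
    -- the return address, carried over `ldexp`'s footprint
    have hs0 : UInt64.ofNat (s_10b9b5r.mem.readLE (u.reg .rsp) 8) = ret := by
      u_frame he_retAddr
    u_walk hcode [hμ.vendor] span [Vorbis.L.textLo, Vorbis.L.textHi] side (v_side)
    refine ReachVia.done ?_
    v_returned
    show ShadowUntouched u.mem s_10b9c2.mem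
    v_untouched
  · v_after_call w_rsp_10b9b5 w_mem_10b9b5
    -- the return address, carried over `ldexp`'s footprint
    have hs0 : UInt64.ofNat (s_10b9b5r.mem.readLE (u.reg .rsp) 8) = ret := by
      u_frame he_retAddr
    u_walk hcode [hμ.vendor] span [Vorbis.L.textLo, Vorbis.L.textHi] side (v_side)
    refine ReachVia.done ?_
    v_returned
    show ShadowUntouched u.mem s_10b9c2.mem
    v_untouched
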